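-- pv_equiv track=rewrite | github.com/queelius/computational-explorations | src/new_attacks.py | is_ap_free
-- ===== SOURCE A (Python) =====
-- from typing import Set, List, Tuple, Dict, Optional
--
-- def is_ap_free(A: Set[int], k: int) -> bool:
--     """Check if A contains no k-term arithmetic progression."""
--     A_sorted = sorted(A)
--     A_set = set(A)
--     for i, a in enumerate(A_sorted):
--         for j in range(i + 1, len(A_sorted)):
--             d = A_sorted[j] - a
--             if d == 0:
--                 continue
--             # Check if a, a+d, a+2d, ..., a+(k-1)d are all in A
--             is_ap = True
--             for m in range(2, k):
--                 if a + m * d not in A_set: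
--                     is_ap = False
--                     break
--             if is_ap:
--                 return False
--     return True
-- ===== SOURCE B (Python) =====
-- def is_ap_free(A, k):
--     """Check if A contains no k-term arithmetic progression."""
--     S = sorted(set(A))
--     members = set(A)
--
--     def chain(x, y):
--         # number of terms of the longest AP with difference y - x ending at x, y
--         d = y - x
--         t = 2
--         while x - d in members:
--             x -= d
--             t += 1
--         return t
--
--     return not any(chain(S[i], S[j]) >= k
--                    for j in range(len(S)) for i in range(j))
-- ===== Notes on version B (the rewrite author's own statement) =====
-- stated objective: faster
-- what changed: A enumerates candidate first pairs and verifies up to k-2 forward memberships; B deduplicates, treats each pair of distinct values as the LAST two terms of a progression and computes the length of the maximal progression ending there by a backward walk, comparing it to k.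
import Mathlib
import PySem

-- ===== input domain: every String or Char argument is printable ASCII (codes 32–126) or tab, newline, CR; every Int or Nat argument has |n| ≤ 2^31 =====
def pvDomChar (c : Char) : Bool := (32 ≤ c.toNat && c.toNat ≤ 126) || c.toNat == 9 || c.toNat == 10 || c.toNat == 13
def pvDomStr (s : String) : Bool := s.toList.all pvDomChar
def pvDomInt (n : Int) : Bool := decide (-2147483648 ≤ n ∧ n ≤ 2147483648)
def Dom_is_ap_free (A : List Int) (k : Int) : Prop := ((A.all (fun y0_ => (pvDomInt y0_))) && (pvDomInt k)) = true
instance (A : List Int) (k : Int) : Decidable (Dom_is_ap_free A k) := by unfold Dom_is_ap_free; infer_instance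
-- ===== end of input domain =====

-- B reformulates the search: instead of verifying k-2 forward memberships for each candidate
-- first pair (A), it deduplicates and, for each pair of distinct values taken as the LAST two
-- terms, computes the length of the maximal progression ending there by walking backwards.
-- Objective: alternative (work bounded by the longest progression present, not by k).

-- ===== PORT A =====
-- the inner flag loop 'for m in range(2, k): if a + m*d not in A_set: is_ap = False; break':
-- fuel = (k-2).toNat is exactly len(range(2, k)); the break is the early 'else false' exit.
def pvForM (A_set : List Int) (a d : Int) : Nat → Int → Bool
  | 0, _ => true
  | f+1, m => if PySem.Set.contains A_set (a + m * d) then pvForM A_set a d f (m + 1) else false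

def is_ap_free (A : List Int) (k : Int) : Bool :=
  let A_sorted := PySem.List.sorted A (fun x => x) false
  let A_set := PySem.Set.ofList A
  -- for i,a in enumerate(A_sorted): for j in range(i+1, len): …; the early 'return False' is any;
  -- the inner is_ap flag loop with break is all over range(2, k); A_sorted[j] via pyGetD (j in range).
  !((PySem.List.enumerate A_sorted).any (fun ia =>
    (PySem.List.pyRange (ia.1 + 1) (A_sorted.length : Int) 1).any (fun j =>
      let d := PySem.List.pyGetD A_sorted j 0 - ia.2
      if d = 0 then false
      else pvForM A_set ia.2 d (k - 2).toNat 2)))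

-- ===== PORT B =====
-- Source B's chain: d = y - x; t = 2; while x - d in members: x -= d; t += 1; return t.
-- The fuel argument (called with |S|) only makes the loop total: it strictly descends through
-- distinct members of the set, so it never exhausts that fuel.
def pvChain (members : List Int) (d : Int) : Nat → Int → Int → Int
  | 0, _, t => t
  | f+1, x, t => if PySem.Set.contains members (x - d) then pvChain members d f (x - d) (t + 1) else t

def is_ap_free_alt (A : List Int) (k : Int) : Bool :=
  let members := PySem.Set.ofList A
  let S := PySem.List.sorted members (fun x => x) false
  !((List.range S.length).any (fun j => (List.range j).any (fun i =>
    decide (k ≤ pvChain members (S.getD j 0 - S.getD i 0) S.length (S.getD i 0) 2))))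

-- ===== PRECONDITION & SPEC =====
def Spec_is_ap_free (A : List Int) (k : Int) (out : Bool) : Prop := out = is_ap_free_alt A k
instance (A : List Int) (k : Int) (out : Bool) : Decidable (Spec_is_ap_free A k out) := by unfold Spec_is_ap_free; infer_instance

-- ===== CLAIM (what is proved, stated in full; the proofs are below) =====
def Claim_equal_is_ap_free : Prop := ∀ (A : List Int) (k : Int), Dom_is_ap_free A k → Spec_is_ap_free A k (is_ap_free A k)

-- ===== LEMMAS AND PROOFS =====

-- Both programs return False exactly when A contains x < y whose extension x + m(y-x), 2 ≤ m < k, stays in A.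
def pvHasAP (A : List Int) (k : Int) : Prop :=
  ∃ x y : Int, x ∈ A ∧ y ∈ A ∧ x < y ∧ ∀ m : Int, 2 ≤ m → m < k → x + m * (y - x) ∈ A

theorem pvChain_ge (members : List Int) (d : Int) :
    ∀ (f : Nat) (x t : Int), t ≤ pvChain members d f x t := by
  intro f
  induction f with
  | zero => intro x t; simp [pvChain]
  | succ f ih =>
    intro x t
    simp only [pvChain]
    split
    · exact le_trans (by omega) (ih (x - d) (t + 1))
    · exact le_refl t

theorem pvChain_mem (members : List Int) (d : Int) :
    ∀ (f : Nat) (x t s : Int), 1 ≤ s → s ≤ pvChain members d f x t - t → (x - s * d) ∈ members := by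
  intro f
  induction f with
  | zero => intro x t s h1 h2; simp [pvChain] at h2; omega
  | succ f ih =>
    intro x t s h1 h2
    simp only [pvChain] at h2
    by_cases hc : PySem.Set.contains members (x - d) = true
    · rw [if_pos hc] at h2
      rcases eq_or_lt_of_le h1 with h | h
      · have : x - s * d = x - d := by rw [← h]; ring
        rw [this]
        exact (PySem.Set.contains_iff _ _).1 hc
      · have hmem := ih (x - d) (t + 1) (s - 1) (by omega) (by omega)
        have : x - d - (s - 1) * d = x - s * d := by ring
        rwa [this] at hmem
    · rw [if_neg hc] at h2; omega

theorem pvChain_le (members : List Int) (d : Int) :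
    ∀ (r f : Nat), r ≤ f → ∀ (x t : Int),
      (∀ s : Int, 1 ≤ s → s ≤ (r : Int) → (x - s * d) ∈ members) →
      t + (r : Int) ≤ pvChain members d f x t := by
  intro r
  induction r with
  | zero => intro f _ x t _; simpa using pvChain_ge members d f x t
  | succ r ih =>
    intro f hrf x t hmem
    cases f with
    | zero => omega
    | succ f =>
      have h1 : (x - 1 * d) ∈ members := hmem 1 (by omega) (by push_cast; omega)
      have h1' : (x - d) ∈ members := by rwa [one_mul] at h1
      simp only [pvChain, if_pos ((PySem.Set.contains_iff _ _).2 h1')]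
      have := ih f (by omega) (x - d) (t + 1) (fun s hs1 hs2 => by
        have := hmem (s + 1) (by omega) (by push_cast; omega)
        have he : x - (s + 1) * d = x - d - s * d := by ring
        rwa [he] at this)
      push_cast
      push_cast at this
      omega



theorem pv_indices_of_mem_lt {l : List Int} (hp : l.Pairwise (· ≤ ·)) {x y : Int}
    (hx : x ∈ l) (hy : y ∈ l) (hxy : x < y) :
    ∃ i j : Nat, ∃ hi : i < l.length, ∃ hj : j < l.length, i < j ∧ l[i] = x ∧ l[j] = y := by
  obtain ⟨i, hi, hix⟩ := List.mem_iff_getElem.1 hx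
  obtain ⟨j, hj, hjy⟩ := List.mem_iff_getElem.1 hy
  have hmono := List.pairwise_iff_getElem.1 hp
  refine ⟨i, j, hi, hj, ?_, hix, hjy⟩
  rcases lt_trichotomy i j with h | h | h
  · exact h
  · subst h; have : x = y := hix.symm.trans hjy; omega
  · have : y ≤ x := hjy ▸ hix ▸ hmono j i hj hi h; omega

-- a chain of length ≥ k ending at u, v yields a k-term witness (run backwards from v)
theorem pv_chain_to_ap (A : List Int) (k u v : Int) (huA : u ∈ A) (hvA : v ∈ A)
    (huv : u < v) (f : Nat) (hk : k ≤ pvChain (PySem.Set.ofList A) (v - u) f u 2) :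
    pvHasAP A k := by
  by_cases hk2 : k ≤ 2
  · exact ⟨u, v, huA, hvA, huv, fun m h1 h2 => by omega⟩
  · have hterm : ∀ m : Int, 0 ≤ m → m ≤ k - 1 → v - m * (v - u) ∈ A := by
      intro m h0 h1
      rcases eq_or_lt_of_le h0 with h | h
      · simpa [← h] using hvA
      rcases eq_or_lt_of_le (by omega : (1:ℤ) ≤ m) with h' | h'
      · have he : v - m * (v - u) = u := by rw [← h']; ring
        rwa [he]
      · have hmem := pvChain_mem (PySem.Set.ofList A) (v - u) f u 2 (m - 1)
          (by omega) (by omega)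
        have he : u - (m - 1) * (v - u) = v - m * (v - u) := by ring
        rw [he] at hmem
        exact (PySem.Set.mem_ofList _ _).1 hmem
    refine ⟨v - (k - 1) * (v - u), v - (k - 2) * (v - u),
      hterm (k-1) (by omega) (by omega), hterm (k-2) (by omega) (by omega), by nlinarith, ?_⟩
    intro m h1 h2
    have he : v - (k - 1) * (v - u) + m * (v - (k - 2) * (v - u) - (v - (k - 1) * (v - u))) =
        v - (k - 1 - m) * (v - u) := by ring
    rw [he]
    exact hterm (k - 1 - m) (by omega) (by omega)

-- a k-term witness yields a pair u < v whose backward chain has length ≥ k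
theorem pv_ap_to_chain (A : List Int) (k : Int) (h : pvHasAP A k) :
    ∃ u v : Int, u ∈ A ∧ v ∈ A ∧ u < v ∧ (k - 2).toNat ≤ (PySem.Set.ofList A).length ∧
      ∀ f : Nat, (k - 2).toNat ≤ f → k ≤ pvChain (PySem.Set.ofList A) (v - u) f u 2 := by
  obtain ⟨x, y, hx, hy, hxy, hext⟩ := h
  by_cases hk2 : k ≤ 2
  · refine ⟨x, y, hx, hy, hxy, by omega, fun f _ => le_trans hk2 (pvChain_ge _ _ _ _ _)⟩
  · set d := y - x with hd
    have hall : ∀ m : Int, 0 ≤ m → m ≤ k - 1 → x + m * d ∈ A := by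
      intro m h0 h1
      rcases eq_or_lt_of_le h0 with h | h
      · simpa [← h] using hx
      rcases eq_or_lt_of_le (by omega : (1:ℤ) ≤ m) with h' | h'
      · have he : x + m * d = y := by rw [← h']; ring
        rwa [he]
      · exact hext m (by omega) (by omega)
    have hcount : (k - 2).toNat ≤ (PySem.Set.ofList A).length := by
      have hinj : Function.Injective (fun s : Nat => x + (s : Int) * d) := by
        intro a b hab
        simp only at hab
        have h1 : (a : Int) * d = (b : Int) * d := by omega
        have h2 := mul_right_cancel₀ (by omega : d ≠ 0) h1
        exact_mod_cast h2
      have hnodup : ((List.range ((k-2).toNat + 1)).map (fun s : Nat => x + (s : Int) * d)).Nodup :=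
        List.nodup_range.map hinj
      have hsub : ((List.range ((k-2).toNat + 1)).map (fun s : Nat => x + (s : Int) * d)) ⊆
          PySem.Set.ofList A := by
        intro z hz
        simp only [List.mem_map, List.mem_range] at hz
        obtain ⟨s, hs, rfl⟩ := hz
        refine (PySem.Set.mem_ofList _ _).2 (hall s (by omega) ?_)
        have h1 : (s : Int) ≤ ((k-2).toNat : Int) := by exact_mod_cast Nat.le_of_lt_succ hs
        omega
      have hle := (List.subperm_of_subset hnodup hsub).length_le
      simp only [List.length_map, List.length_range] at hle
      omega
    refine ⟨x + (k - 2) * d, x + (k - 1) * d,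
      hall (k-2) (by omega) (by omega), hall (k-1) (by omega) (by omega), by nlinarith,
      hcount, ?_⟩
    intro f hf
    have hde : x + (k - 1) * d - (x + (k - 2) * d) = d := by ring
    rw [hde]
    have hch := pvChain_le (PySem.Set.ofList A) d (k-2).toNat f hf
      (x + (k - 2) * d) 2 (fun s hs1 hs2 => by
        have he : x + (k - 2) * d - s * d = x + (k - 2 - s) * d := by ring
        rw [he]
        have hs2' : s ≤ k - 2 := by omega
        exact (PySem.Set.mem_ofList _ _).2 (hall (k - 2 - s) (by omega) (by omega)))
    have hc : ((k-2).toNat : Int) = k - 2 := by omega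
    omega

theorem pv_S_mem (A : List Int) (z : Int) :
    z ∈ PySem.List.sorted (PySem.Set.ofList A) (fun x => x) false ↔ z ∈ A := by
  rw [PySem.List.mem_sorted, PySem.Set.mem_ofList]

theorem pv_B_false_iff (A : List Int) (k : Int) : is_ap_free_alt A k = false ↔ pvHasAP A k := by
  unfold is_ap_free_alt
  simp only [Bool.not_eq_false', List.any_eq_true, List.mem_range, decide_eq_true_eq]
  have hstrict : (PySem.List.sorted (PySem.Set.ofList A) (fun x => x) false).Pairwise (· < ·) := by
    simpa using PySem.List.sorted_ofList_pairwise_lt A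
  have hsmono := List.pairwise_iff_getElem.1 hstrict
  constructor
  · rintro ⟨j, hj, i, hij, hk⟩
    have hi : i < (PySem.List.sorted (PySem.Set.ofList A) (fun x => x) false).length := by omega
    rw [List.getD_eq_getElem _ _ hj, List.getD_eq_getElem _ _ hi] at hk
    exact pv_chain_to_ap A k _ _
      ((pv_S_mem A _).1 (List.getElem_mem hi)) ((pv_S_mem A _).1 (List.getElem_mem hj))
      (hsmono i j hi hj hij) _ hk
  · intro h
    obtain ⟨u, v, huA, hvA, huv, hcount, hch⟩ := pv_ap_to_chain A k h
    have hple : (PySem.List.sorted (PySem.Set.ofList A) (fun x => x) false).Pairwise (· ≤ ·) :=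
      hstrict.imp (fun h => le_of_lt h)
    obtain ⟨i, j, hi, hj, hij, hix, hjy⟩ :=
      pv_indices_of_mem_lt hple ((pv_S_mem A u).2 huA) ((pv_S_mem A v).2 hvA) huv
    refine ⟨j, hj, i, hij, ?_⟩
    rw [List.getD_eq_getElem _ _ hj, List.getD_eq_getElem _ _ hi, hix, hjy]
    exact hch _ (by rw [PySem.List.length_sorted]; exact hcount)


theorem pvForM_iff (s : List Int) (a d : Int) :
    ∀ (f : Nat) (m0 : Int), pvForM s a d f m0 = true ↔
      ∀ m : Int, m0 ≤ m → m < m0 + f → a + m * d ∈ s := by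
  intro f
  induction f with
  | zero =>
    intro m0
    constructor
    · intro _ m h1 h2; exact absurd h2 (by omega)
    · intro _; rfl
  | succ f ih =>
    intro m0
    simp only [pvForM]
    by_cases hc : PySem.Set.contains s (a + m0 * d) = true
    · rw [if_pos hc, ih (m0 + 1)]
      constructor
      · intro h m h1 h2
        rcases eq_or_lt_of_le h1 with h' | h'
        · rw [← h']; exact (PySem.Set.contains_iff _ _).1 hc
        · exact h m (by omega) (by push_cast at h2 ⊢; omega)
      · intro h m h1 h2
        exact h m (by omega) (by push_cast at h2 ⊢; omega)
    · rw [if_neg hc]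
      constructor
      · intro h; cases h
      · intro h; exact absurd ((PySem.Set.contains_iff _ _).2 (h m0 le_rfl (by push_cast; omega))) hc

theorem pv_A_false_iff (A : List Int) (k : Int) : is_ap_free A k = false ↔ pvHasAP A k := by
  unfold is_ap_free
  simp only [Bool.not_eq_false', List.any_eq_true, PySem.List.mem_enumerate_iff,
    PySem.List.mem_pyRange_one]
  constructor
  · rintro ⟨p, ⟨i, hi, rfl⟩, j, ⟨hj1, hj2⟩, hcond⟩
    simp only [zero_add] at hj1 hj2 hcond
    have h0j : (0:ℤ) ≤ j := by omega
    rw [PySem.List.pyGetD_eq_getElem _ _ h0j hj2] at hcond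
    have hjn : j.toNat < (PySem.List.sorted A (fun x => x) false).length := by omega
    have hij : i < j.toNat := by omega
    have hmono := List.pairwise_iff_getElem.1 (PySem.List.sorted_pairwise A (fun x => x))
    have hle : (PySem.List.sorted A (fun x => x) false)[i] ≤ (PySem.List.sorted A (fun x => x) false)[j.toNat] :=
      hmono i j.toNat hi hjn hij
    by_cases hd : (PySem.List.sorted A (fun x => x) false)[j.toNat] - (PySem.List.sorted A (fun x => x) false)[i] = 0
    · rw [if_pos hd] at hcond; simp at hcond
    · rw [if_neg hd, pvForM_iff] at hcond
      refine ⟨(PySem.List.sorted A (fun x => x) false)[i], (PySem.List.sorted A (fun x => x) false)[j.toNat],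
        ?_, ?_, by omega, ?_⟩
      · exact (PySem.List.mem_sorted _ _ _ _).1 (List.getElem_mem hi)
      · exact (PySem.List.mem_sorted _ _ _ _).1 (List.getElem_mem hjn)
      · intro m hm1 hm2
        have := hcond m hm1 (by omega)
        exact (PySem.Set.mem_ofList _ _).1 this
  · rintro ⟨x, y, hx, hy, hxy, hext⟩
    have hp : (PySem.List.sorted A (fun x => x) false).Pairwise (· ≤ ·) := by
      simpa using PySem.List.sorted_pairwise A (fun x => x)
    obtain ⟨i, j, hi, hj, hij, hix, hjy⟩ := pv_indices_of_mem_lt hp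
      ((PySem.List.mem_sorted _ _ _ _).2 hx) ((PySem.List.mem_sorted _ _ _ _).2 hy) hxy
    refine ⟨(↑i, (PySem.List.sorted A (fun x => x) false)[i]), ⟨i, hi, by simp⟩, (j:ℤ), ⟨by omega, by omega⟩, ?_⟩
    rw [PySem.List.pyGetD_eq_getElem _ _ (by omega) (by omega)]
    simp only [Int.toNat_natCast, hix, hjy]
    rw [if_neg (by omega), pvForM_iff]
    intro m hm1 hm2
    exact (PySem.Set.mem_ofList _ _).2 (hext m hm1 (by omega))

-- ===== VERDICT (by name: the statement is the Claim_ definition above) =====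
theorem is_ap_free_spec : Claim_equal_is_ap_free := by
  intro A k _
  unfold Spec_is_ap_free
  have h := (pv_A_false_iff A k).trans (pv_B_false_iff A k).symm
  cases ha : is_ap_free A k <;> cases hb : is_ap_free_alt A k <;> simp_all
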